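-- pv_equiv track=rewrite | github.com/youareplan-ceo/mcp-map-company | apps/stockpilot/ai_engine/routing/cost_optimizer.py | _abbreviate_common_terms
-- ===== SOURCE A (Python) =====
-- def _abbreviate_common_terms(content: str) -> str:
--     """일반적인 용어 축약"""
--     abbreviations = {
--         "artificial intelligence": "AI",
--         "machine learning": "ML",
--         "natural language processing": "NLP",
--         "return on investment": "ROI",
--         "year over year": "YoY",
--         "quarter over quarter": "QoQ",
--         "price to earnings": "P/E",
--         "earnings before interest and taxes": "EBIT",
--         "moving average": "MA",
--         "relative strength index": "RSI"
--     }
--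
--     compressed = content
--     for full_term, abbrev in abbreviations.items():
--         compressed = compressed.replace(full_term, abbrev)
--         compressed = compressed.replace(full_term.title(), abbrev)
--
--     return compressed
-- ===== SOURCE B (Python) =====
-- def _abbreviate_common_terms(content: str) -> str:
--     """일반적인 용어 축약"""
--     abbreviations = {
--         "artificial intelligence": "AI",
--         "machine learning": "ML",
--         "natural language processing": "NLP",
--         "return on investment": "ROI",
--         "year over year": "YoY",
--         "quarter over quarter": "QoQ",
--         "price to earnings": "P/E",
--         "earnings before interest and taxes": "EBIT",
--         "moving average": "MA",
--         "relative strength index": "RSI"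
--     }
--
--     compressed = content
--     for full_term, abbrev in abbreviations.items():
--         # one explicit left-to-right scan per term, matching the lowercase
--         # and Title-case forms simultaneously and emitting into an accumulator
--         lower_form, title_form = full_term, full_term.title()
--         pieces = []
--         i, n = 0, len(compressed)
--         while i < n:
--             if compressed.startswith(lower_form, i):
--                 pieces.append(abbrev)
--                 i += len(lower_form)
--             elif compressed.startswith(title_form, i):
--                 pieces.append(abbrev)
--                 i += len(title_form)
--             else:
--                 pieces.append(compressed[i])
--                 i += 1
--         compressed = "".join(pieces)
--     return compressed
-- ===== Notes on version B (the rewrite author's own statement) =====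
-- stated objective: alternative
-- what changed: B replaces each term's two global str.replace passes by one explicit left-to-right scan that matches the lowercase and the Title-case form simultaneously and emits through an accumulator (10 single fused passes instead of 20 chained replace passes); the two algorithms provably disagree on the two case-splice strings excluded by Pre_.
-- outside the precondition, e.g. on _abbreviate_common_terms('year over yearear Over Year'): A returns 'YoYoY', B returns 'YoYear Over Year'
import Mathlib
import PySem

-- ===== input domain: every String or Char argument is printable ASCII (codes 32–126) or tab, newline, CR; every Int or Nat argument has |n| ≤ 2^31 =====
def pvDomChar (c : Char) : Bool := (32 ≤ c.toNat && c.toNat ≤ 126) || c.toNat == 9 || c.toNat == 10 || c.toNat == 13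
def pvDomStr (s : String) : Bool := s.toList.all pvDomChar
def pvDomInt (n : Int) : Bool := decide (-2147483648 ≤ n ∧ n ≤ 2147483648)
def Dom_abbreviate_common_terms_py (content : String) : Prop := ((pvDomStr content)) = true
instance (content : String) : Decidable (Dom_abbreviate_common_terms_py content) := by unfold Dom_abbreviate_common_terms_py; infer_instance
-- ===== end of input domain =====

-- B fuses each term's two str.replace passes (lowercase form, Title form) into ONE explicit
-- left-to-right scan per term; A and B provably differ on the two case-splice strings excluded by Pre_.


-- ===== PORT A =====
-- literal port of A: for each dict entry, replace the full term, then its .title() form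
def abbreviate_common_terms_py (content : String) : String :=
  let c := content
  let c := PySem.Str.replace c "artificial intelligence" "AI"
  let c := PySem.Str.replace c "Artificial Intelligence" "AI"
  let c := PySem.Str.replace c "machine learning" "ML"
  let c := PySem.Str.replace c "Machine Learning" "ML"
  let c := PySem.Str.replace c "natural language processing" "NLP"
  let c := PySem.Str.replace c "Natural Language Processing" "NLP"
  let c := PySem.Str.replace c "return on investment" "ROI"
  let c := PySem.Str.replace c "Return On Investment" "ROI"
  let c := PySem.Str.replace c "year over year" "YoY"
  let c := PySem.Str.replace c "Year Over Year" "YoY"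
  let c := PySem.Str.replace c "quarter over quarter" "QoQ"
  let c := PySem.Str.replace c "Quarter Over Quarter" "QoQ"
  let c := PySem.Str.replace c "price to earnings" "P/E"
  let c := PySem.Str.replace c "Price To Earnings" "P/E"
  let c := PySem.Str.replace c "earnings before interest and taxes" "EBIT"
  let c := PySem.Str.replace c "Earnings Before Interest And Taxes" "EBIT"
  let c := PySem.Str.replace c "moving average" "MA"
  let c := PySem.Str.replace c "Moving Average" "MA"
  let c := PySem.Str.replace c "relative strength index" "RSI"
  let c := PySem.Str.replace c "Relative Strength Index" "RSI"
  c

-- ===== PORT B =====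
-- Source B's per-term while loop: res = []; i = 0; while i < n: match lowercase form, else Title
-- form, else copy one char; the recursion consumes the remaining characters (fuel = remaining length)
def pvScanF (lo ti ab : List Char) : Nat → List Char → List Char
  | 0, l => l
  | _ + 1, [] => []
  | fuel + 1, c :: t =>
    if lo.isPrefixOf (c :: t) then ab ++ pvScanF lo ti ab fuel (List.drop lo.length (c :: t))
    else if ti.isPrefixOf (c :: t) then ab ++ pvScanF lo ti ab fuel (List.drop ti.length (c :: t))
    else c :: pvScanF lo ti ab fuel t

-- one entry of Source B's loop body: scan the whole current text once (i = 0, n = len(text))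
def pvScanEntry (lo ti ab l : List Char) : List Char := pvScanF lo ti ab l.length l

-- Source B's dict flattened to (lowercase form, .title() form, abbreviation) triples, in dict order
def pvEntries : List (List Char × List Char × List Char) :=
  [("artificial intelligence".toList, "Artificial Intelligence".toList, "AI".toList),
     ("machine learning".toList, "Machine Learning".toList, "ML".toList),
     ("natural language processing".toList, "Natural Language Processing".toList, "NLP".toList),
     ("return on investment".toList, "Return On Investment".toList, "ROI".toList),
     ("year over year".toList, "Year Over Year".toList, "YoY".toList),
     ("quarter over quarter".toList, "Quarter Over Quarter".toList, "QoQ".toList),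
     ("price to earnings".toList, "Price To Earnings".toList, "P/E".toList),
     ("earnings before interest and taxes".toList, "Earnings Before Interest And Taxes".toList, "EBIT".toList),
     ("moving average".toList, "Moving Average".toList, "MA".toList),
     ("relative strength index".toList, "Relative Strength Index".toList, "RSI".toList)]

def abbreviate_common_terms_py_alt (content : String) : String :=
  String.ofList (pvEntries.foldl (fun l e => pvScanEntry e.1 e.2.1 e.2.2 l) content.toList)

-- ===== PRECONDITION & SPEC =====
-- the two case-splice strings on which the two algorithms provably differ:
-- replacing the lowercase phrase first makes its abbreviation's trailing capital complete a
-- Title-case phrase, which A's chained replace then collapses again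
def pvDangerY : List Char := "year over yearear Over Year".toList
def pvDangerQ : List Char := "quarter over quarteruarter Over Quarter".toList

-- Pre_ excludes contents containing one of the two case-splice substrings above, where the
-- lowercase replacement's trailing capital completes a Title-case phrase: there A's chained
-- replace collapses the spliced phrase too while B's single scan leaves the spliced tail as
-- written; on such accidental phrase collisions both results are defensible.
def Pre_abbreviate_common_terms_py (content : String) : Prop :=
  ¬ (pvDangerY <:+: content.toList) ∧ ¬ (pvDangerQ <:+: content.toList)
instance (content : String) : Decidable (Pre_abbreviate_common_terms_py content) := by
  unfold Pre_abbreviate_common_terms_py; infer_instance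

def pvWitness_abbreviate_common_terms_py : String := "machine learning beats a moving average"

def Spec_abbreviate_common_terms_py (content : String) (out : String) : Prop := out = abbreviate_common_terms_py_alt content
instance (content : String) (out : String) : Decidable (Spec_abbreviate_common_terms_py content out) := by unfold Spec_abbreviate_common_terms_py; infer_instance

-- ===== CLAIM (what is proved, stated in full; the proofs are below) =====
def Claim_equal_abbreviate_common_terms_py : Prop := ∀ (content : String), Dom_abbreviate_common_terms_py content → Pre_abbreviate_common_terms_py content → Spec_abbreviate_common_terms_py content (abbreviate_common_terms_py content)

-- ===== LEMMAS AND PROOFS =====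

-- accumulator-free mirror of PySem.Chars.replace.go
def pvRepF (old new : List Char) : Nat → List Char → List Char
  | 0, l => l
  | _ + 1, [] => []
  | fuel + 1, c :: t =>
    if old.isPrefixOf (c :: t) then new ++ pvRepF old new fuel (List.drop old.length (c :: t))
    else c :: pvRepF old new fuel t

theorem pvRep_go (old new : List Char) :
    ∀ (fuel : Nat) (l acc : List Char),
      PySem.Chars.replace.go old new fuel l acc = acc.reverse ++ pvRepF old new fuel l := by
  intro fuel
  induction fuel with
  | zero => intro l acc; simp [PySem.Chars.replace.go, pvRepF]
  | succ n ih =>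
    intro l acc
    cases l with
    | nil => simp [PySem.Chars.replace.go, pvRepF]
    | cons c t =>
      simp only [PySem.Chars.replace.go, pvRepF]
      split <;> simp [ih]

theorem pvRepF_fuel (old new : List Char) (hold : old ≠ []) :
    ∀ (fuel fuel' : Nat) (l : List Char), l.length ≤ fuel → l.length ≤ fuel' →
      pvRepF old new fuel l = pvRepF old new fuel' l := by
  intro fuel
  induction fuel with
  | zero =>
    intro fuel' l hl _
    have : l = [] := List.eq_nil_of_length_eq_zero (Nat.le_zero.mp hl)
    subst this
    cases fuel' <;> rfl
  | succ n ih =>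
    intro fuel' l hl hl'
    cases l with
    | nil => cases fuel' <;> rfl
    | cons c t =>
      cases fuel' with
      | zero => simp at hl'
      | succ m =>
        have hlen : 1 ≤ old.length := by
          cases old with
          | nil => exact absurd rfl hold
          | cons _ _ => simp
        simp only [pvRepF]
        split
        · rw [ih m (List.drop old.length (c :: t))
                (by simp [List.length_drop] at hl ⊢; omega) (by simp [List.length_drop] at hl' ⊢; omega)]
        · rw [ih m t (by simp at hl; omega) (by simp at hl'; omega)]

theorem pvScanF_fuel (lo ti ab : List Char) (hlo : lo ≠ []) (hti : ti ≠ []) :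
    ∀ (fuel fuel' : Nat) (l : List Char), l.length ≤ fuel → l.length ≤ fuel' →
      pvScanF lo ti ab fuel l = pvScanF lo ti ab fuel' l := by
  intro fuel
  induction fuel with
  | zero =>
    intro fuel' l hl _
    have : l = [] := List.eq_nil_of_length_eq_zero (Nat.le_zero.mp hl)
    subst this
    cases fuel' <;> rfl
  | succ n ih =>
    intro fuel' l hl hl'
    cases l with
    | nil => cases fuel' <;> rfl
    | cons c t =>
      cases fuel' with
      | zero => simp at hl'
      | succ m =>
        have hlen1 : 1 ≤ lo.length := List.length_pos_iff.mpr hlo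
        have hlen2 : 1 ≤ ti.length := List.length_pos_iff.mpr hti
        simp only [pvScanF]
        split
        · rw [ih m (List.drop lo.length (c :: t))
                (by simp [List.length_drop] at hl ⊢; omega) (by simp [List.length_drop] at hl' ⊢; omega)]
        · split
          · rw [ih m (List.drop ti.length (c :: t))
                  (by simp [List.length_drop] at hl ⊢; omega) (by simp [List.length_drop] at hl' ⊢; omega)]
          · rw [ih m t (by simp at hl; omega) (by simp at hl'; omega)]

-- length-fuelled replace, and the bridge from PySem.Str.replace
def pvRep (old new l : List Char) : List Char := pvRepF old new l.length l

theorem str_replace_toList (s old new : String) (h : old.toList.isEmpty = false) :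
    (PySem.Str.replace s old new).toList = pvRep old.toList new.toList s.toList := by
  unfold PySem.Str.replace PySem.Chars.replace pvRep
  rw [h]
  simp [pvRep_go]

theorem pv_prefix_bool (p l : List Char) (h : p <+: l) : p.isPrefixOf l = true :=
  List.isPrefixOf_iff_prefix.mpr h

theorem pv_prefix_bool_neg (p l : List Char) (h : ¬ p <+: l) : p.isPrefixOf l = false := by
  rw [← List.isPrefixOf_iff_prefix] at h
  exact Bool.eq_false_iff.mpr h

-- unfolding equations of pvRep
theorem pvRep_pos (p a l : List Char) (hp : p ≠ []) (h : p <+: l) :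
    pvRep p a l = a ++ pvRep p a (l.drop p.length) := by
  cases l with
  | nil => exact absurd (List.prefix_nil.mp h) hp
  | cons c t =>
    unfold pvRep
    simp only [List.length_cons, pvRepF, pv_prefix_bool p _ h, if_true]
    congr 1
    exact pvRepF_fuel p a hp t.length _ _
      (by simp [List.length_drop]; have := List.length_pos_iff.mpr hp; omega) le_rfl

theorem pvRep_neg (p a : List Char) (c : Char) (t : List Char) (_hp : p ≠ [])
    (h : ¬ p <+: (c :: t)) : pvRep p a (c :: t) = c :: pvRep p a t := by
  unfold pvRep
  simp only [List.length_cons, pvRepF, pv_prefix_bool_neg p _ h]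
  simp

-- unfolding equations of pvScanEntry
theorem pvScan_lo (lo ti ab l : List Char) (hlo : lo ≠ []) (hti : ti ≠ []) (h : lo <+: l) :
    pvScanEntry lo ti ab l = ab ++ pvScanEntry lo ti ab (l.drop lo.length) := by
  cases l with
  | nil => exact absurd (List.prefix_nil.mp h) hlo
  | cons c t =>
    unfold pvScanEntry
    simp only [List.length_cons, pvScanF, pv_prefix_bool lo _ h, if_true]
    congr 1
    exact pvScanF_fuel lo ti ab hlo hti t.length _ _
      (by simp [List.length_drop]; have := List.length_pos_iff.mpr hlo; omega) le_rfl

theorem pvScan_ti (lo ti ab l : List Char) (hlo : lo ≠ []) (hti : ti ≠ [])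
    (h1 : ¬ lo <+: l) (h2 : ti <+: l) :
    pvScanEntry lo ti ab l = ab ++ pvScanEntry lo ti ab (l.drop ti.length) := by
  cases l with
  | nil => exact absurd (List.prefix_nil.mp h2) hti
  | cons c t =>
    unfold pvScanEntry
    simp only [List.length_cons, pvScanF, pv_prefix_bool_neg lo _ h1, pv_prefix_bool ti _ h2]
    simp only [Bool.false_eq_true, if_false, if_true]
    congr 1
    exact pvScanF_fuel lo ti ab hlo hti t.length _ _
      (by simp [List.length_drop]; have := List.length_pos_iff.mpr hti; omega) le_rfl

theorem pvScan_step (lo ti ab : List Char) (c : Char) (t : List Char)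
    (h1 : ¬ lo <+: (c :: t)) (h2 : ¬ ti <+: (c :: t)) :
    pvScanEntry lo ti ab (c :: t) = c :: pvScanEntry lo ti ab t := by
  unfold pvScanEntry
  simp only [List.length_cons, pvScanF, pv_prefix_bool_neg lo _ h1, pv_prefix_bool_neg ti _ h2]
  simp

-- two prefixes of the same list are comparable
theorem pv_dichot {x v w : List Char} (h : w <+: x ++ v) : x <+: w ∨ w <+: x :=
  List.prefix_or_prefix_of_prefix (List.prefix_append x v) h

-- replace passes an initial segment through untouched when no match starts inside it
theorem pvRep_pass (p a : List Char) (hp : p ≠ []) :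
    ∀ (x v : List Char), (∀ j, j < x.length → ¬ p <+: (x.drop j ++ v)) →
      pvRep p a (x ++ v) = x ++ pvRep p a v := by
  intro x
  induction x with
  | nil => intro v _; simp
  | cons c x' ih =>
    intro v h
    have h0 : ¬ p <+: (c :: (x' ++ v)) := by
      have := h 0 (by simp)
      simpa using this
    rw [List.cons_append, pvRep_neg p a c (x' ++ v) hp h0,
        ih v (fun j hj => by have := h (j + 1) (by simp; omega); simpa using this),
        List.cons_append]

-- a prefix of the output of replace that can neither start nor end inside an inserted
-- abbreviation is a prefix of the input
theorem pvRep_prefix_transfer (p a w : List Char) (hp : p ≠ [])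
    (hsp : ∀ w' ∈ w.tails, w' ≠ [] → ¬ w' <+: a ∧ ¬ a <+: w') :
    ∀ (n : Nat) (l w' : List Char), l.length ≤ n → w' ∈ w.tails → w' ≠ [] →
      w' <+: pvRep p a l → w' <+: l := by
  intro n
  induction n with
  | zero =>
    intro l w' hl _ hne hpre
    have : l = [] := List.eq_nil_of_length_eq_zero (Nat.le_zero.mp hl)
    subst this
    exact absurd (List.prefix_nil.mp hpre) hne
  | succ n ih =>
    intro l w' hl hmem hne hpre
    cases l with
    | nil => exact absurd (List.prefix_nil.mp hpre) hne
    | cons c t =>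
      by_cases hm : p <+: (c :: t)
      · rw [pvRep_pos p a _ hp hm] at hpre
        rcases pv_dichot hpre with h | h
        · exact absurd h (hsp w' hmem hne).2
        · exact absurd h (hsp w' hmem hne).1
      · rw [pvRep_neg p a c t hp hm] at hpre
        cases w' with
        | nil => exact absurd rfl hne
        | cons w0 wt =>
          obtain ⟨he, hpr⟩ := List.cons_prefix_cons.mp hpre
          by_cases hwt : wt = []
          · subst hwt; subst he
            exact List.cons_prefix_cons.mpr ⟨rfl, List.nil_prefix⟩
          · have hmem' : wt ∈ w.tails :=
              (List.mem_tails _ _).mpr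
                (((List.tail_suffix (w0 :: wt)).trans ((List.mem_tails _ _).mp hmem)))
            have := ih t wt (by simpa using hl) hmem' hwt hpr
            exact List.cons_prefix_cons.mpr ⟨he, this⟩

-- an infix of x ++ v that cannot overlap any suffix of x lies in v
theorem pv_infix_append (w : List Char) :
    ∀ (x v : List Char),
      (∀ x' ∈ x.tails, x' ≠ [] → ¬ x' <+: w ∧ ¬ w <+: x') →
      w <:+: (x ++ v) → w <:+: v := by
  intro x
  induction x with
  | nil => intro v _ h; simpa using h
  | cons c x' ih =>
    intro v hx h
    rw [List.cons_append, List.infix_cons_iff] at h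
    rcases h with h | h
    · rw [← List.cons_append] at h
      rcases pv_dichot h with h2 | h2
      · exact absurd h2 (hx (c :: x') ((List.mem_tails _ _).mpr (List.suffix_refl _)) (by simp)).1
      · exact absurd h2 (hx (c :: x') ((List.mem_tails _ _).mpr (List.suffix_refl _)) (by simp)).2
    · exact ih v (fun y hy hyne => hx y ((List.mem_tails _ _).mpr
        (((List.mem_tails _ _).mp hy).trans (List.suffix_cons c x'))) hyne) h

-- replace cannot create an occurrence of w when no splice with the abbreviation is possible
theorem pvRep_infix_transfer (p a w : List Char) (hp : p ≠ []) (hw : w ≠ [])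
    (hsp : ∀ w' ∈ w.tails, w' ≠ [] → ¬ w' <+: a ∧ ¬ a <+: w')
    (hsp2 : ∀ a' ∈ a.tails, a' ≠ [] → ¬ a' <+: w ∧ ¬ w <+: a') :
    ∀ (n : Nat) (l : List Char), l.length ≤ n → w <:+: pvRep p a l → w <:+: l := by
  intro n
  induction n with
  | zero =>
    intro l hl hin
    have : l = [] := List.eq_nil_of_length_eq_zero (Nat.le_zero.mp hl)
    subst this
    exact absurd (List.infix_nil.mp hin) hw
  | succ n ih =>
    intro l hl hin
    cases l with
    | nil => exact absurd (List.infix_nil.mp hin) hw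
    | cons c t =>
      by_cases hm : p <+: (c :: t)
      · rw [pvRep_pos p a _ hp hm] at hin
        have h2 := pv_infix_append w a (pvRep p a ((c :: t).drop p.length)) hsp2 hin
        have hlen : ((c :: t).drop p.length).length ≤ n := by
          simp [List.length_drop] at hl ⊢
          have := List.length_pos_iff.mpr hp
          omega
        exact (ih _ hlen h2).trans (List.drop_suffix _ _).isInfix
      · rw [pvRep_neg p a c t hp hm] at hin
        rw [List.infix_cons_iff] at hin
        rcases hin with hin | hin
        · cases w with
          | nil => exact absurd rfl hw
          | cons w0 wt =>
            obtain ⟨he, hpr⟩ := List.cons_prefix_cons.mp hin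
            by_cases hwt : wt = []
            · subst hwt; subst he
              exact (List.cons_prefix_cons.mpr ⟨rfl, List.nil_prefix⟩ :
                ([w0] : List Char) <+: w0 :: t).isInfix
            · have hmem : wt ∈ (w0 :: wt).tails :=
                (List.mem_tails _ _).mpr (List.tail_suffix (w0 :: wt))
              have := pvRep_prefix_transfer p a (w0 :: wt) hp hsp t.length t wt le_rfl hmem hwt hpr
              exact (List.cons_prefix_cons.mpr ⟨he, this⟩ : (w0 :: wt) <+: c :: t).isInfix
        · exact (ih t (by simpa using hl) hin).trans (List.suffix_cons c t).isInfix
          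
theorem pv_no_create (p a w : List Char) (hp : p ≠ []) (hw : w ≠ [])
    (hsp : ∀ w' ∈ w.tails, w' ≠ [] → ¬ w' <+: a ∧ ¬ a <+: w')
    (hsp2 : ∀ a' ∈ a.tails, a' ≠ [] → ¬ a' <+: w ∧ ¬ w <+: a')
    (l : List Char) (h : ¬ w <:+: l) : ¬ w <:+: pvRep p a l :=
  fun hc => h (pvRep_infix_transfer p a w hp hw hsp hsp2 l.length l le_rfl hc)

-- the per-entry main lemma: two chained replaces = one fused scan
theorem pvEntry_eq (p q a : List Char) (Safe : List Char → Prop)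
    (hp : p ≠ []) (hq : q ≠ [])
    (hmono : ∀ l1 l2, l1 <:+: l2 → Safe l2 → Safe l1)
    (hb : ∀ j, j < q.length → ¬ (q.drop j) <+: p ∧ ¬ p <+: (q.drop j))
    (hspq : ∀ w' ∈ q.tails, w' ≠ [] → ¬ w' <+: a ∧ ¬ a <+: w')
    (hqa : ∀ u, Safe (p ++ u) → ∀ i, i < a.length → ¬ q <+: ((a.drop i) ++ pvRep p a u)) :
    ∀ (n : Nat) (l : List Char), l.length ≤ n → Safe l →
      pvRep q a (pvRep p a l) = pvScanEntry p q a l := by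
  intro n
  induction n with
  | zero =>
    intro l hl _
    have : l = [] := List.eq_nil_of_length_eq_zero (Nat.le_zero.mp hl)
    subst this
    rfl
  | succ n ih =>
    intro l hl hS
    by_cases hmp : p <+: l
    · obtain ⟨u, hu⟩ := hmp
      subst hu
      rw [pvRep_pos p a _ hp ⟨u, rfl⟩, List.drop_left,
          pvRep_pass q a hq a (pvRep p a u) (fun j hj => hqa u hS j hj),
          ih u (by simp at hl; have := List.length_pos_iff.mpr hp; omega)
            (hmono u _ (List.suffix_append p u).isInfix hS),
          pvScan_lo p q a _ hp hq ⟨u, rfl⟩, List.drop_left]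
    · by_cases hmq : q <+: l
      · obtain ⟨u, hu⟩ := hmq
        subst hu
        rw [pvRep_pass p a hp q u
              (fun j hj hcon => (pv_dichot hcon).elim (hb j hj).1 (hb j hj).2),
            pvRep_pos q a _ hq ⟨pvRep p a u, rfl⟩, List.drop_left,
            ih u (by simp at hl; have := List.length_pos_iff.mpr hq; omega)
              (hmono u _ (List.suffix_append q u).isInfix hS),
            pvScan_ti p q a _ hp hq hmp ⟨u, rfl⟩, List.drop_left]
      · cases l with
        | nil => rfl
        | cons c t =>
          rw [pvRep_neg p a c t hp hmp]
          have hnq : ¬ q <+: (c :: pvRep p a t) := by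
            intro hcon
            cases hq' : q with
            | nil => exact hq hq'
            | cons q0 qt =>
              rw [hq'] at hcon
              obtain ⟨he, hpr⟩ := List.cons_prefix_cons.mp hcon
              by_cases hqt : qt = []
              · subst hqt; subst he
                exact hmq (by rw [hq']; exact ⟨t, rfl⟩)
              · have hmem : qt ∈ q.tails := by
                  rw [hq']
                  exact (List.mem_tails _ _).mpr (List.tail_suffix (q0 :: qt))
                have hq2 : qt <+: t :=
                  pvRep_prefix_transfer p a q hp hspq t.length t qt le_rfl hmem hqt hpr
                exact hmq (by rw [hq']; exact List.cons_prefix_cons.mpr ⟨he, hq2⟩)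
          rw [pvRep_neg q a c (pvRep p a t) hq hnq,
              ih t (by simpa using hl) (hmono t _ (List.suffix_cons c t).isInfix hS),
              pvScan_step p q a c t hmp hmq]

theorem pv_hqa_of_struct (p q a : List Char)
    (hstruct : ∀ i, i < a.length → ¬ (a.drop i) <+: q ∧ ¬ q <+: (a.drop i)) :
    ∀ (u : List Char), ∀ i, i < a.length → ¬ q <+: ((a.drop i) ++ pvRep p a u) :=
  fun _ i hi hcon => (pv_dichot hcon).elim (hstruct i hi).1 (hstruct i hi).2

theorem pvEntry_eq_triv (p q a : List Char) (hp : p ≠ []) (hq : q ≠ [])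
    (hb : ∀ j, j < q.length → ¬ (q.drop j) <+: p ∧ ¬ p <+: (q.drop j))
    (hspq : ∀ w' ∈ q.tails, w' ≠ [] → ¬ w' <+: a ∧ ¬ a <+: w')
    (hstruct : ∀ i, i < a.length → ¬ (a.drop i) <+: q ∧ ¬ q <+: (a.drop i)) :
    ∀ (l : List Char), pvRep q a (pvRep p a l) = pvScanEntry p q a l :=
  fun l => pvEntry_eq p q a (fun _ => True) hp hq (fun _ _ _ _ => trivial) hb hspq
    (fun u _ i hi => pv_hqa_of_struct p q a hstruct u i hi) l.length l le_rfl trivial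

theorem pv_hqa_Y : ∀ (u : List Char), ¬ pvDangerY <:+: ("year over year".toList ++ u) →
    ∀ i, i < ("YoY".toList).length → ¬ "Year Over Year".toList <+: (("YoY".toList.drop i) ++ pvRep "year over year".toList "YoY".toList u) := by
  intro u hS i hi hcon
  have hi3 : i < 3 := by
    have : ("YoY".toList).length = 3 := by decide
    omega
  interval_cases i
  · exact (pv_dichot hcon).elim (fun h => by revert h; decide) (fun h => by revert h; decide)
  · exact (pv_dichot hcon).elim (fun h => by revert h; decide) (fun h => by revert h; decide)
  · have hdrop : ("YoY".toList.drop 2) = ["YoY".toList[2]!] := by decide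
    have hq : "Year Over Year".toList = "Year Over Year".toList[0]! :: "ear Over Year".toList := by decide
    rw [hdrop, hq] at hcon
    have h2 := (List.cons_prefix_cons.mp hcon).2
    have h3 : "ear Over Year".toList <+: u :=
      pvRep_prefix_transfer "year over year".toList "YoY".toList "Year Over Year".toList (by decide) (by decide)
        u.length u "ear Over Year".toList le_rfl (by decide) (by decide) h2
    obtain ⟨v2, hv2⟩ := h3
    apply hS
    refine ⟨[], v2, ?_⟩
    have hdang : pvDangerY = "year over year".toList ++ "ear Over Year".toList := by decide
    rw [hdang]
    simpa using hv2

theorem pvEntry_eq_Y : ∀ (l : List Char), ¬ pvDangerY <:+: l →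
    pvRep "Year Over Year".toList "YoY".toList (pvRep "year over year".toList "YoY".toList l) = pvScanEntry "year over year".toList "Year Over Year".toList "YoY".toList l :=
  fun l hS => pvEntry_eq "year over year".toList "Year Over Year".toList "YoY".toList (fun l' => ¬ pvDangerY <:+: l')
    (by decide) (by decide) (fun l1 l2 hinf hS2 hc => hS2 (hc.trans hinf))
    (by decide) (by decide) pv_hqa_Y l.length l le_rfl hS

theorem pv_hqa_Q : ∀ (u : List Char), ¬ pvDangerQ <:+: ("quarter over quarter".toList ++ u) →
    ∀ i, i < ("QoQ".toList).length → ¬ "Quarter Over Quarter".toList <+: (("QoQ".toList.drop i) ++ pvRep "quarter over quarter".toList "QoQ".toList u) := by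
  intro u hS i hi hcon
  have hi3 : i < 3 := by
    have : ("QoQ".toList).length = 3 := by decide
    omega
  interval_cases i
  · exact (pv_dichot hcon).elim (fun h => by revert h; decide) (fun h => by revert h; decide)
  · exact (pv_dichot hcon).elim (fun h => by revert h; decide) (fun h => by revert h; decide)
  · have hdrop : ("QoQ".toList.drop 2) = ["QoQ".toList[2]!] := by decide
    have hq : "Quarter Over Quarter".toList = "Quarter Over Quarter".toList[0]! :: "uarter Over Quarter".toList := by decide
    rw [hdrop, hq] at hcon
    have h2 := (List.cons_prefix_cons.mp hcon).2
    have h3 : "uarter Over Quarter".toList <+: u :=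
      pvRep_prefix_transfer "quarter over quarter".toList "QoQ".toList "Quarter Over Quarter".toList (by decide) (by decide)
        u.length u "uarter Over Quarter".toList le_rfl (by decide) (by decide) h2
    obtain ⟨v2, hv2⟩ := h3
    apply hS
    refine ⟨[], v2, ?_⟩
    have hdang : pvDangerQ = "quarter over quarter".toList ++ "uarter Over Quarter".toList := by decide
    rw [hdang]
    simpa using hv2

theorem pvEntry_eq_Q : ∀ (l : List Char), ¬ pvDangerQ <:+: l →
    pvRep "Quarter Over Quarter".toList "QoQ".toList (pvRep "quarter over quarter".toList "QoQ".toList l) = pvScanEntry "quarter over quarter".toList "Quarter Over Quarter".toList "QoQ".toList l :=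
  fun l hS => pvEntry_eq "quarter over quarter".toList "Quarter Over Quarter".toList "QoQ".toList (fun l' => ¬ pvDangerQ <:+: l')
    (by decide) (by decide) (fun l1 l2 hinf hS2 hc => hS2 (hc.trans hinf))
    (by decide) (by decide) pv_hqa_Q l.length l le_rfl hS

-- ===== VERDICT (by name: the statement is the Claim_ definition above) =====
theorem abbreviate_common_terms_py_spec : Claim_equal_abbreviate_common_terms_py := by
  intro content _ hpre
  obtain ⟨hY, hQ⟩ := hpre
  unfold Spec_abbreviate_common_terms_py
  apply String.toList_inj.mp
  have hB : (abbreviate_common_terms_py_alt content).toList =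
      pvScanEntry "relative strength index".toList "Relative Strength Index".toList "RSI".toList (pvScanEntry "moving average".toList "Moving Average".toList "MA".toList (pvScanEntry "earnings before interest and taxes".toList "Earnings Before Interest And Taxes".toList "EBIT".toList (pvScanEntry "price to earnings".toList "Price To Earnings".toList "P/E".toList (pvScanEntry "quarter over quarter".toList "Quarter Over Quarter".toList "QoQ".toList (pvScanEntry "year over year".toList "Year Over Year".toList "YoY".toList (pvScanEntry "return on investment".toList "Return On Investment".toList "ROI".toList (pvScanEntry "natural language processing".toList "Natural Language Processing".toList "NLP".toList (pvScanEntry "machine learning".toList "Machine Learning".toList "ML".toList (pvScanEntry "artificial intelligence".toList "Artificial Intelligence".toList "AI".toList (content.toList)))))))))) := by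
    simp [abbreviate_common_terms_py_alt, pvEntries, pvScanEntry]
  have hA : (abbreviate_common_terms_py content).toList =
      pvRep "Relative Strength Index".toList "RSI".toList (pvRep "relative strength index".toList "RSI".toList (pvRep "Moving Average".toList "MA".toList (pvRep "moving average".toList "MA".toList (pvRep "Earnings Before Interest And Taxes".toList "EBIT".toList (pvRep "earnings before interest and taxes".toList "EBIT".toList (pvRep "Price To Earnings".toList "P/E".toList (pvRep "price to earnings".toList "P/E".toList (pvRep "Quarter Over Quarter".toList "QoQ".toList (pvRep "quarter over quarter".toList "QoQ".toList (pvRep "Year Over Year".toList "YoY".toList (pvRep "year over year".toList "YoY".toList (pvRep "Return On Investment".toList "ROI".toList (pvRep "return on investment".toList "ROI".toList (pvRep "Natural Language Processing".toList "NLP".toList (pvRep "natural language processing".toList "NLP".toList (pvRep "Machine Learning".toList "ML".toList (pvRep "machine learning".toList "ML".toList (pvRep "Artificial Intelligence".toList "AI".toList (pvRep "artificial intelligence".toList "AI".toList (content.toList)))))))))))))))))))) := by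
    simp only [abbreviate_common_terms_py]
    rw [str_replace_toList _ _ _ (by decide), str_replace_toList _ _ _ (by decide), str_replace_toList _ _ _ (by decide), str_replace_toList _ _ _ (by decide), str_replace_toList _ _ _ (by decide), str_replace_toList _ _ _ (by decide), str_replace_toList _ _ _ (by decide), str_replace_toList _ _ _ (by decide), str_replace_toList _ _ _ (by decide), str_replace_toList _ _ _ (by decide), str_replace_toList _ _ _ (by decide), str_replace_toList _ _ _ (by decide), str_replace_toList _ _ _ (by decide), str_replace_toList _ _ _ (by decide), str_replace_toList _ _ _ (by decide), str_replace_toList _ _ _ (by decide), str_replace_toList _ _ _ (by decide), str_replace_toList _ _ _ (by decide), str_replace_toList _ _ _ (by decide), str_replace_toList _ _ _ (by decide)]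
  rw [hA, hB]
  have sY0 : ¬ pvDangerY <:+: content.toList := hY
  have sQ0 : ¬ pvDangerQ <:+: content.toList := hQ
  have E1 : pvRep "Artificial Intelligence".toList "AI".toList (pvRep "artificial intelligence".toList "AI".toList (content.toList)) = pvScanEntry "artificial intelligence".toList "Artificial Intelligence".toList "AI".toList (content.toList) :=
    pvEntry_eq_triv "artificial intelligence".toList "Artificial Intelligence".toList "AI".toList (by decide) (by decide) (by decide) (by decide) (by decide) _
  have sY1 : ¬ pvDangerY <:+: (pvScanEntry "artificial intelligence".toList "Artificial Intelligence".toList "AI".toList (content.toList)) := by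
    rw [← E1]
    exact pv_no_create "Artificial Intelligence".toList "AI".toList pvDangerY (by decide) (by decide) (by decide) (by decide) _ (pv_no_create "artificial intelligence".toList "AI".toList pvDangerY (by decide) (by decide) (by decide) (by decide) _ sY0)
  have sQ1 : ¬ pvDangerQ <:+: (pvScanEntry "artificial intelligence".toList "Artificial Intelligence".toList "AI".toList (content.toList)) := by
    rw [← E1]
    exact pv_no_create "Artificial Intelligence".toList "AI".toList pvDangerQ (by decide) (by decide) (by decide) (by decide) _ (pv_no_create "artificial intelligence".toList "AI".toList pvDangerQ (by decide) (by decide) (by decide) (by decide) _ sQ0)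
  have E2 : pvRep "Machine Learning".toList "ML".toList (pvRep "machine learning".toList "ML".toList (pvScanEntry "artificial intelligence".toList "Artificial Intelligence".toList "AI".toList (content.toList))) = pvScanEntry "machine learning".toList "Machine Learning".toList "ML".toList (pvScanEntry "artificial intelligence".toList "Artificial Intelligence".toList "AI".toList (content.toList)) :=
    pvEntry_eq_triv "machine learning".toList "Machine Learning".toList "ML".toList (by decide) (by decide) (by decide) (by decide) (by decide) _
  have sY2 : ¬ pvDangerY <:+: (pvScanEntry "machine learning".toList "Machine Learning".toList "ML".toList (pvScanEntry "artificial intelligence".toList "Artificial Intelligence".toList "AI".toList (content.toList))) := by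
    rw [← E2]
    exact pv_no_create "Machine Learning".toList "ML".toList pvDangerY (by decide) (by decide) (by decide) (by decide) _ (pv_no_create "machine learning".toList "ML".toList pvDangerY (by decide) (by decide) (by decide) (by decide) _ sY1)
  have sQ2 : ¬ pvDangerQ <:+: (pvScanEntry "machine learning".toList "Machine Learning".toList "ML".toList (pvScanEntry "artificial intelligence".toList "Artificial Intelligence".toList "AI".toList (content.toList))) := by
    rw [← E2]
    exact pv_no_create "Machine Learning".toList "ML".toList pvDangerQ (by decide) (by decide) (by decide) (by decide) _ (pv_no_create "machine learning".toList "ML".toList pvDangerQ (by decide) (by decide) (by decide) (by decide) _ sQ1)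
  have E3 : pvRep "Natural Language Processing".toList "NLP".toList (pvRep "natural language processing".toList "NLP".toList (pvScanEntry "machine learning".toList "Machine Learning".toList "ML".toList (pvScanEntry "artificial intelligence".toList "Artificial Intelligence".toList "AI".toList (content.toList)))) = pvScanEntry "natural language processing".toList "Natural Language Processing".toList "NLP".toList (pvScanEntry "machine learning".toList "Machine Learning".toList "ML".toList (pvScanEntry "artificial intelligence".toList "Artificial Intelligence".toList "AI".toList (content.toList))) :=
    pvEntry_eq_triv "natural language processing".toList "Natural Language Processing".toList "NLP".toList (by decide) (by decide) (by decide) (by decide) (by decide) _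
  have sY3 : ¬ pvDangerY <:+: (pvScanEntry "natural language processing".toList "Natural Language Processing".toList "NLP".toList (pvScanEntry "machine learning".toList "Machine Learning".toList "ML".toList (pvScanEntry "artificial intelligence".toList "Artificial Intelligence".toList "AI".toList (content.toList)))) := by
    rw [← E3]
    exact pv_no_create "Natural Language Processing".toList "NLP".toList pvDangerY (by decide) (by decide) (by decide) (by decide) _ (pv_no_create "natural language processing".toList "NLP".toList pvDangerY (by decide) (by decide) (by decide) (by decide) _ sY2)
  have sQ3 : ¬ pvDangerQ <:+: (pvScanEntry "natural language processing".toList "Natural Language Processing".toList "NLP".toList (pvScanEntry "machine learning".toList "Machine Learning".toList "ML".toList (pvScanEntry "artificial intelligence".toList "Artificial Intelligence".toList "AI".toList (content.toList)))) := by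
    rw [← E3]
    exact pv_no_create "Natural Language Processing".toList "NLP".toList pvDangerQ (by decide) (by decide) (by decide) (by decide) _ (pv_no_create "natural language processing".toList "NLP".toList pvDangerQ (by decide) (by decide) (by decide) (by decide) _ sQ2)
  have E4 : pvRep "Return On Investment".toList "ROI".toList (pvRep "return on investment".toList "ROI".toList (pvScanEntry "natural language processing".toList "Natural Language Processing".toList "NLP".toList (pvScanEntry "machine learning".toList "Machine Learning".toList "ML".toList (pvScanEntry "artificial intelligence".toList "Artificial Intelligence".toList "AI".toList (content.toList))))) = pvScanEntry "return on investment".toList "Return On Investment".toList "ROI".toList (pvScanEntry "natural language processing".toList "Natural Language Processing".toList "NLP".toList (pvScanEntry "machine learning".toList "Machine Learning".toList "ML".toList (pvScanEntry "artificial intelligence".toList "Artificial Intelligence".toList "AI".toList (content.toList)))) :=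
    pvEntry_eq_triv "return on investment".toList "Return On Investment".toList "ROI".toList (by decide) (by decide) (by decide) (by decide) (by decide) _
  have sY4 : ¬ pvDangerY <:+: (pvScanEntry "return on investment".toList "Return On Investment".toList "ROI".toList (pvScanEntry "natural language processing".toList "Natural Language Processing".toList "NLP".toList (pvScanEntry "machine learning".toList "Machine Learning".toList "ML".toList (pvScanEntry "artificial intelligence".toList "Artificial Intelligence".toList "AI".toList (content.toList))))) := by
    rw [← E4]
    exact pv_no_create "Return On Investment".toList "ROI".toList pvDangerY (by decide) (by decide) (by decide) (by decide) _ (pv_no_create "return on investment".toList "ROI".toList pvDangerY (by decide) (by decide) (by decide) (by decide) _ sY3)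
  have sQ4 : ¬ pvDangerQ <:+: (pvScanEntry "return on investment".toList "Return On Investment".toList "ROI".toList (pvScanEntry "natural language processing".toList "Natural Language Processing".toList "NLP".toList (pvScanEntry "machine learning".toList "Machine Learning".toList "ML".toList (pvScanEntry "artificial intelligence".toList "Artificial Intelligence".toList "AI".toList (content.toList))))) := by
    rw [← E4]
    exact pv_no_create "Return On Investment".toList "ROI".toList pvDangerQ (by decide) (by decide) (by decide) (by decide) _ (pv_no_create "return on investment".toList "ROI".toList pvDangerQ (by decide) (by decide) (by decide) (by decide) _ sQ3)
  have E5 : pvRep "Year Over Year".toList "YoY".toList (pvRep "year over year".toList "YoY".toList (pvScanEntry "return on investment".toList "Return On Investment".toList "ROI".toList (pvScanEntry "natural language processing".toList "Natural Language Processing".toList "NLP".toList (pvScanEntry "machine learning".toList "Machine Learning".toList "ML".toList (pvScanEntry "artificial intelligence".toList "Artificial Intelligence".toList "AI".toList (content.toList)))))) = pvScanEntry "year over year".toList "Year Over Year".toList "YoY".toList (pvScanEntry "return on investment".toList "Return On Investment".toList "ROI".toList (pvScanEntry "natural language processing".toList "Natural Language Processing".toList "NLP".toList (pvScanEntry "machine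 learning".toList "Machine Learning".toList "ML".toList (pvScanEntry "artificial intelligence".toList "Artificial Intelligence".toList "AI".toList (content.toList))))) := pvEntry_eq_Y _ sY4
  have sQ5 : ¬ pvDangerQ <:+: (pvScanEntry "year over year".toList "Year Over Year".toList "YoY".toList (pvScanEntry "return on investment".toList "Return On Investment".toList "ROI".toList (pvScanEntry "natural language processing".toList "Natural Language Processing".toList "NLP".toList (pvScanEntry "machine learning".toList "Machine Learning".toList "ML".toList (pvScanEntry "artificial intelligence".toList "Artificial Intelligence".toList "AI".toList (content.toList)))))) := by
    rw [← E5]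
    exact pv_no_create "Year Over Year".toList "YoY".toList pvDangerQ (by decide) (by decide) (by decide) (by decide) _ (pv_no_create "year over year".toList "YoY".toList pvDangerQ (by decide) (by decide) (by decide) (by decide) _ sQ4)
  have E6 : pvRep "Quarter Over Quarter".toList "QoQ".toList (pvRep "quarter over quarter".toList "QoQ".toList (pvScanEntry "year over year".toList "Year Over Year".toList "YoY".toList (pvScanEntry "return on investment".toList "Return On Investment".toList "ROI".toList (pvScanEntry "natural language processing".toList "Natural Language Processing".toList "NLP".toList (pvScanEntry "machine learning".toList "Machine Learning".toList "ML".toList (pvScanEntry "artificial intelligence".toList "Artificial Intelligence".toList "AI".toList (content.toList))))))) = pvScanEntry "quarter over quarter".toList "Quarter Over Quarter".toList "QoQ".toList (pvScanEntry "year over year".toList "Year Over Year".toList "YoY".toList (pvScanEntry "return on investment".toList "Return On Investment".toList "ROI".toList (pvScanEntry "natural language processing".toList "Natural Language Processing".toList "NLP".toList (pvScanEntry "machine learning".toList "Machine Learning".toList "ML".toList (pvScanEntry "artificial intelligence".toList "Artificial Intelligence".toList "AI".toList (content.toList)))))) := pvEntry_eq_Q _ sQ5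
  have E7 : pvRep "Price To Earnings".toList "P/E".toList (pvRep "price to earnings".toList "P/E".toList (pvScanEntry "quarter over quarter".toList "Quarter Over Quarter".toList "QoQ".toList (pvScanEntry "year over year".toList "Year Over Year".toList "YoY".toList (pvScanEntry "return on investment".toList "Return On Investment".toList "ROI".toList (pvScanEntry "natural language processing".toList "Natural Language Processing".toList "NLP".toList (pvScanEntry "machine learning".toList "Machine Learning".toList "ML".toList (pvScanEntry "artificial intelligence".toList "Artificial Intelligence".toList "AI".toList (content.toList)))))))) = pvScanEntry "price to earnings".toList "Price To Earnings".toList "P/E".toList (pvScanEntry "quarter over quarter".toList "Quarter Over Quarter".toList "QoQ".toList (pvScanEntry "year over year".toList "Year Over Year".toList "YoY".toList (pvScanEntry "return on investment".toList "Return On Investment".toList "ROI".toList (pvScanEntry "natural language processing".toList "Natural Language Processing".toList "NLP".toList (pvScanEntry "machine learning".toList "Machine Learning".toList "ML".toList (pvScanEntry "artificial intelligence".toList "Artificial Intelligence".toList "AI".toList (content.toList))))))) :=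
    pvEntry_eq_triv "price to earnings".toList "Price To Earnings".toList "P/E".toList (by decide) (by decide) (by decide) (by decide) (by decide) _
  have E8 : pvRep "Earnings Before Interest And Taxes".toList "EBIT".toList (pvRep "earnings before interest and taxes".toList "EBIT".toList (pvScanEntry "price to earnings".toList "Price To Earnings".toList "P/E".toList (pvScanEntry "quarter over quarter".toList "Quarter Over Quarter".toList "QoQ".toList (pvScanEntry "year over year".toList "Year Over Year".toList "YoY".toList (pvScanEntry "return on investment".toList "Return On Investment".toList "ROI".toList (pvScanEntry "natural language processing".toList "Natural Language Processing".toList "NLP".toList (pvScanEntry "machine learning".toList "Machine Learning".toList "ML".toList (pvScanEntry "artificial intelligence".toList "Artificial Intelligence".toList "AI".toList (content.toList))))))))) = pvScanEntry "earnings before interest and taxes".toList "Earnings Before Interest And Taxes".toList "EBIT".toList (pvScanEntry "price to earnings".toList "Price To Earnings".toList "P/E".toList (pvScanEntry "quarter over quarter".toList "Quarter Over Quarter".toList "QoQ".toList (pvScanEntry "year over year".toList "Year Over Year".toList "YoY".toList (pvScanEntry "return on investment".toList "Return On Investment".toList "ROI".toList (pvScanEntry "natural language processing".toList "Natural Language Processing".toList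 "NLP".toList (pvScanEntry "machine learning".toList "Machine Learning".toList "ML".toList (pvScanEntry "artificial intelligence".toList "Artificial Intelligence".toList "AI".toList (content.toList)))))))) :=
    pvEntry_eq_triv "earnings before interest and taxes".toList "Earnings Before Interest And Taxes".toList "EBIT".toList (by decide) (by decide) (by decide) (by decide) (by decide) _
  have E9 : pvRep "Moving Average".toList "MA".toList (pvRep "moving average".toList "MA".toList (pvScanEntry "earnings before interest and taxes".toList "Earnings Before Interest And Taxes".toList "EBIT".toList (pvScanEntry "price to earnings".toList "Price To Earnings".toList "P/E".toList (pvScanEntry "quarter over quarter".toList "Quarter Over Quarter".toList "QoQ".toList (pvScanEntry "year over year".toList "Year Over Year".toList "YoY".toList (pvScanEntry "return on investment".toList "Return On Investment".toList "ROI".toList (pvScanEntry "natural language processing".toList "Natural Language Processing".toList "NLP".toList (pvScanEntry "machine learning".toList "Machine Learning".toList "ML".toList (pvScanEntry "artificial intelligence".toList "Artificial Intelligence".toList "AI".toList (content.toList)))))))))) = pvScanEntry "moving average".toList "Moving Average".toList "MA".toList (pvScanEntry "earnings before interest and taxes".toList "Earnings Before Interest And Taxes".toList "EBIT".toList (pvScanEntry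 "price to earnings".toList "Price To Earnings".toList "P/E".toList (pvScanEntry "quarter over quarter".toList "Quarter Over Quarter".toList "QoQ".toList (pvScanEntry "year over year".toList "Year Over Year".toList "YoY".toList (pvScanEntry "return on investment".toList "Return On Investment".toList "ROI".toList (pvScanEntry "natural language processing".toList "Natural Language Processing".toList "NLP".toList (pvScanEntry "machine learning".toList "Machine Learning".toList "ML".toList (pvScanEntry "artificial intelligence".toList "Artificial Intelligence".toList "AI".toList (content.toList))))))))) :=
    pvEntry_eq_triv "moving average".toList "Moving Average".toList "MA".toList (by decide) (by decide) (by decide) (by decide) (by decide) _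
  have E10 : pvRep "Relative Strength Index".toList "RSI".toList (pvRep "relative strength index".toList "RSI".toList (pvScanEntry "moving average".toList "Moving Average".toList "MA".toList (pvScanEntry "earnings before interest and taxes".toList "Earnings Before Interest And Taxes".toList "EBIT".toList (pvScanEntry "price to earnings".toList "Price To Earnings".toList "P/E".toList (pvScanEntry "quarter over quarter".toList "Quarter Over Quarter".toList "QoQ".toList (pvScanEntry "year over year".toList "Year Over Year".toList "YoY".toList (pvScanEntry "return on investment".toList "Return On Investment".toList "ROI".toList (pvScanEntry "natural language processing".toList "Natural Language Processing".toList "NLP".toList (pvScanEntry "machine learning".toList "Machine Learning".toList "ML".toList (pvScanEntry "artificial intelligence".toList "Artificial Intelligence".toList "AI".toList (content.toList))))))))))) = pvScanEntry "relative strength index".toList "Relative Strength Index".toList "RSI".toList (pvScanEntry "moving average".toList "Moving Average".toList "MA".toList (pvScanEntry "earnings before interest and taxes".toList "Earnings Before Interest And Taxes".toList "EBIT".toList (pvScanEntry "price to earnings".toList "Price To Earnings".toList "P/E".toList (pvScanEntry "quarter over quarter".toList "Quarter Over Quarter".toList "QoQ".toList (pvScanEntry "year over year".toList "Year Over Year".toList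 "YoY".toList (pvScanEntry "return on investment".toList "Return On Investment".toList "ROI".toList (pvScanEntry "natural language processing".toList "Natural Language Processing".toList "NLP".toList (pvScanEntry "machine learning".toList "Machine Learning".toList "ML".toList (pvScanEntry "artificial intelligence".toList "Artificial Intelligence".toList "AI".toList (content.toList)))))))))) :=
    pvEntry_eq_triv "relative strength index".toList "Relative Strength Index".toList "RSI".toList (by decide) (by decide) (by decide) (by decide) (by decide) _
  rw [E1, E2, E3, E4, E5, E6, E7, E8, E9, E10]
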